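-- pv_equiv track=rewrite | github.com/LmeSzinc/Alasio | alasio/db/sqlparse/utils.py | first_token
-- ===== SOURCE A (Python) =====
-- class State:
--     NORMAL = 1
--     SINGLE_LINE_COMMENT = 2
--     MULTI_LINE_COMMENT = 3
--     IN_SINGLE_QUOTE_STRING = 4
--     IN_DOUBLE_QUOTE_STRING = 5  # MySQL and some other DBs use " for strings too
--     IN_BACKTICK_IDENTIFIER = 6  # For MySQL `identifier`
--
-- def first_token(string):
--     """
--     Get the first token in sql, and handle quotes
--
--     Args:
--         string (str):
--
--     Returns:
--         str:
--     """
--     string = string.lstrip()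
--
--     end_index = 0
--     state = State.NORMAL
--     for index, char in enumerate(string):
--         if state == State.NORMAL:
--             if char == "'":
--                 state = State.IN_SINGLE_QUOTE_STRING
--             elif char == '"':
--                 state = State.IN_DOUBLE_QUOTE_STRING
--             elif char == '`':
--                 state = State.IN_BACKTICK_IDENTIFIER
--             elif char in ' \t\r\n':
--                 # first space
--                 end_index = index
--                 break
--
--         elif state == State.IN_SINGLE_QUOTE_STRING:
--             # Single quote ends the string state
--             if char == "'":
--                 state = State.NORMAL
--
--         elif state == State.IN_DOUBLE_QUOTE_STRING:
--             # Double quote ends the string/identifier state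
--             if char == '"':
--                 state = State.NORMAL
--
--         elif state == State.IN_BACKTICK_IDENTIFIER:
--             # Backtick ends the identifier state
--             if char == '`':
--                 state = State.NORMAL
--
--     # if no space found string[:0] will still return an empty string
--     return string[:end_index]
-- ===== SOURCE B (Python) =====
-- def first_token(string):
--     # index walk with find-based skipping of quoted spans; no state machine
--     s = string.lstrip()
--     i, n = 0, len(s)
--     while i < n:
--         c = s[i]
--         if c in ' \t\r\n':
--             return s[:i]
--         if c in '\'"`':
--             j = s.find(c, i + 1)
--             if j == -1:
--                 return ''
--             i = j + 1
--         else: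
--             i += 1
--     return ''
-- ===== Notes on version B (the rewrite author's own statement) =====
-- stated objective: simpler
-- what changed: Replaced A's four-state per-character state machine (enum state + end_index + break) by a stateless index walk that returns s[:i] at the first normal-position whitespace and skips each quoted span in a single str.find call for the matching closing delimiter.
import Mathlib
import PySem

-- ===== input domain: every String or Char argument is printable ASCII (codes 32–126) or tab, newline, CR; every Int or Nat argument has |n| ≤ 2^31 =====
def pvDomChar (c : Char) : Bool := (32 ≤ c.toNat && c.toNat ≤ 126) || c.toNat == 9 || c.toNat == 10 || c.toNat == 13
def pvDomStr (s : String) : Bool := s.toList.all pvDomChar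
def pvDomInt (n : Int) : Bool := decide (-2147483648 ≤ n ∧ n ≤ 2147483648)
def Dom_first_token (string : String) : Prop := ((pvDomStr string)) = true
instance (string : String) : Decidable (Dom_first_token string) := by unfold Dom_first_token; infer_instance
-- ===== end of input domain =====

-- B replaces A's four-state per-character state machine by a stateless index walk that skips
-- each quoted span in one str.find call (objective: simpler).

-- ===== PORT A =====
-- A's for-loop with `state` (1 = NORMAL, 4/5/6 = inside a '/"/` span) and early `break`;
-- `some idx` is the break with end_index = idx, `none` is falling off the loop (end_index stays 0).
def ftA_loop (cs : List Char) (idx : Nat) (state : Nat) : Option Nat :=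
  match cs with
  | [] => none
  | c :: rest =>
    if state = 1 then
      if c = '\'' then ftA_loop rest (idx + 1) 4
      else if c = '"' then ftA_loop rest (idx + 1) 5
      else if c = '`' then ftA_loop rest (idx + 1) 6
      else if c = ' ' ∨ c = '\t' ∨ c = '\r' ∨ c = '\n' then some idx
      else ftA_loop rest (idx + 1) 1
    else if state = 4 then ftA_loop rest (idx + 1) (if c = '\'' then 1 else 4)
    else if state = 5 then ftA_loop rest (idx + 1) (if c = '"' then 1 else 5)
    else ftA_loop rest (idx + 1) (if c = '`' then 1 else 6)

def first_token (string : String) : String :=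
  let s := PySem.Str.lstrip string
  let end_index : Nat := (ftA_loop s.toList 0 1).getD 0
  PySem.Str.slice s none (some (end_index : Int))

-- ===== PORT B =====
-- Source B's while-loop: whitespace → return s[:i]; quote char → jump past the matching close with
-- s.find(c, i + 1) (missing close → ''); otherwise i += 1; loop runs off the end → ''.
def ftB_loop (s : List Char) (i : Nat) : String :=
  if hi : i < s.length then
    if s[i] = ' ' ∨ s[i] = '\t' ∨ s[i] = '\r' ∨ s[i] = '\n' then
      String.ofList (PySem.List.slice s none (some (i : Int)))
    else if s[i] = '\'' ∨ s[i] = '"' ∨ s[i] = '`' then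
      if hj : PySem.Chars.findFrom s [s[i]] ((i + 1 : Nat) : Int) none = -1 then ""
      else
        have hspec := PySem.Chars.findFrom_natCast_spec s [s[i]] (i + 1) (by omega) hj
        ftB_loop s ((PySem.Chars.findFrom s [s[i]] ((i + 1 : Nat) : Int) none).toNat + 1)
    else ftB_loop s (i + 1)
  else ""
termination_by s.length - i
decreasing_by
  · have h3 : (PySem.Chars.findFrom s [s[i]] ((i + 1 : Nat) : Int) none).toNat < s.length := by
      by_contra h
      have h2 := hspec.2.1
      rw [List.drop_eq_nil_of_le (by omega)] at h2
      simp at h2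
    omega
  · omega

def first_token_alt (string : String) : String :=
  ftB_loop (PySem.Str.lstrip string).toList 0

-- ===== PRECONDITION & SPEC =====
def Spec_first_token (string : String) (out : String) : Prop := out = first_token_alt string
instance (string : String) (out : String) : Decidable (Spec_first_token string out) := by unfold Spec_first_token; infer_instance

-- ===== CLAIM (what is proved, stated in full; the proofs are below) =====
def Claim_equal_first_token : Prop := ∀ (string : String), Dom_first_token string → Spec_first_token string (first_token string)

-- ===== LEMMAS AND PROOFS =====

lemma singleton_prefix_iff (c : Char) (l : List Char) : [c] <+: l ↔ l.head? = some c := by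
  cases l with
  | nil => simp
  | cons a t => simp [List.cons_prefix_cons, eq_comm]

-- in a quoted state, A's loop scans for the matching close and then resumes NORMAL just past it
lemma ftA_quote (q : Char) (st : Nat)
    (hst : (st = 4 ∧ q = '\'') ∨ (st = 5 ∧ q = '"') ∨ (st = 6 ∧ q = '`')) :
    ∀ (t : List Char) (j : Nat),
      ftA_loop t j st =
        match t.findIdx? (· = q) with
        | none => none
        | some m => ftA_loop (t.drop (m + 1)) (j + m + 1) 1 := by
  intro t
  induction t with
  | nil =>
    intro j
    rcases hst with ⟨h, hq⟩ | ⟨h, hq⟩ | ⟨h, hq⟩ <;> subst h <;> subst hq <;> simp [ftA_loop]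
  | cons c rest ih =>
    intro j
    have step : ftA_loop (c :: rest) j st =
        if c = q then ftA_loop rest (j + 1) 1 else ftA_loop rest (j + 1) st := by
      rcases hst with ⟨h, hq⟩ | ⟨h, hq⟩ | ⟨h, hq⟩ <;> subst h <;> subst hq <;>
        simp only [ftA_loop] <;> norm_num <;> split_ifs <;> rfl
    rw [step, List.findIdx?_cons]
    by_cases hc : c = q
    · simp [hc]
    · simp only [hc, decide_false, Bool.false_eq_true, ite_false, ih (j + 1)]
      cases hr : rest.findIdx? (· = q) with
      | none => simp
      | some m =>
        simp only [Option.map_some, List.drop_succ_cons]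
        have : j + 1 + m + 1 = j + (m + 1) + 1 := by omega
        rw [this]

lemma ftB_eq_ftA (s : List Char) :
    ∀ (n i : Nat), i ≤ s.length → s.length - i ≤ n →
      ftB_loop s i = String.ofList (s.take ((ftA_loop (s.drop i) i 1).getD 0)) := by
  intro n
  induction n with
  | zero =>
    intro i hi hn
    have hieq : i = s.length := by omega
    rw [ftB_loop]
    simp [hieq, List.drop_length, ftA_loop]
  | succ n ih =>
    intro i hi hn
    by_cases hlt : i < s.length
    · have hdrop : s.drop i = s[i] :: s.drop (i + 1) := (List.getElem_cons_drop hlt).symm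
      rw [ftB_loop]
      rw [hdrop]
      simp only [dif_pos hlt]
      by_cases hws : s[i] = ' ' ∨ s[i] = '\t' ∨ s[i] = '\r' ∨ s[i] = '\n'
      · -- whitespace: break with end_index = i; B returns s[:i]
        have hnq : ¬ (s[i] = '\'') ∧ ¬ (s[i] = '"') ∧ ¬ (s[i] = '`') := by
          rcases hws with h | h | h | h <;> rw [h] <;> refine ⟨by decide, by decide, by decide⟩
        simp only [ftA_loop, hnq.1, hnq.2.1, hnq.2.2, if_false, ite_true, hws]
        rw [PySem.List.slice_to_natCast]
        simp
      · rw [if_neg hws]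
        by_cases hq : s[i] = '\'' ∨ s[i] = '"' ∨ s[i] = '`'
        · -- quote: A enters the matching state; rewrite it with ftA_quote
          have hstA : ftA_loop (s[i] :: s.drop (i + 1)) i 1 =
              match (s.drop (i + 1)).findIdx? (· = s[i]) with
              | none => none
              | some m => ftA_loop ((s.drop (i + 1)).drop (m + 1)) (i + 1 + m + 1) 1 := by
            rcases hq with h | h | h <;>
              · rw [show ftA_loop (s[i] :: s.drop (i + 1)) i 1 =
                    ftA_loop (s.drop (i + 1)) (i + 1)
                      (if s[i] = '\'' then 4 else if s[i] = '"' then 5 else 6) by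
                    simp [ftA_loop, h]]
                rw [ftA_quote s[i] _ (by simp [h])]
          rw [if_pos hq, hstA]
          by_cases hj : PySem.Chars.findFrom s [s[i]] ((i + 1 : Nat) : Int) none = -1
          · -- no closing delimiter: both sides give ""
            have hnin : ∀ x ∈ s.drop (i + 1), ¬ x = s[i] := by
              intro x hx hxq
              have := (PySem.Chars.findFrom_natCast_eq_neg_one_iff s [s[i]] (i + 1)
                (by omega)).mp hj
              exact this ((List.singleton_infix_iff _ _).mpr (hxq ▸ hx))
            have hnone : (s.drop (i + 1)).findIdx? (· = s[i]) = none := by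
              rw [List.findIdx?_eq_none_iff]
              intro x hx
              simpa using hnin x hx
            rw [dif_pos hj, hnone]
            simp
          · -- closing delimiter at r: A resumes NORMAL at r+1, B recurses at r+1
            rw [dif_neg hj]
            have hspec := PySem.Chars.findFrom_natCast_spec s [s[i]] (i + 1) (by omega) hj
            set r := (PySem.Chars.findFrom s [s[i]] ((i + 1 : Nat) : Int) none).toNat with hr
            have hir : i + 1 ≤ r := by
              have := hspec.1; omega
            have hrlen : r < s.length := by
              by_contra h
              have h2 := hspec.2.1
              rw [List.drop_eq_nil_of_le (by omega)] at h2
              simp at h2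
            have hrc : s[r] = s[i] := by
              have h2 := hspec.2.1
              rw [singleton_prefix_iff, List.head?_drop] at h2
              simpa [List.getElem?_eq_getElem hrlen] using h2
            have hfind : (s.drop (i + 1)).findIdx? (· = s[i]) = some (r - (i + 1)) := by
              rw [List.findIdx?_eq_some_iff_getElem]
              refine ⟨by simp [List.length_drop]; omega, ?_, ?_⟩
              · have : (s.drop (i + 1))[r - (i + 1)]'(by simp [List.length_drop]; omega)
                    = s[r] := by
                  rw [List.getElem_drop]
                  congr 1
                  omega
                simp [this, hrc]
              · intro jj hjj
                have hlt2 : i + 1 + jj < r := by omega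
                have := hspec.2.2 (i + 1 + jj) (by omega) (by omega)
                rw [singleton_prefix_iff, List.head?_drop] at this
                have hgl : i + 1 + jj < s.length := by omega
                rw [List.getElem?_eq_getElem hgl] at this
                have : ¬ s[i + 1 + jj] = s[i] := by simpa using this
                rw [List.getElem_drop]
                simpa using this
            rw [hfind]
            simp only [List.drop_drop]
            have harith : i + 1 + (r - (i + 1) + 1) = r + 1 := by omega
            have harith2 : i + 1 + (r - (i + 1)) + 1 = r + 1 := by omega
            rw [harith, harith2]
            exact ih (r + 1) (by omega) (by omega)
        · -- ordinary character: both sides step to i + 1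
          rw [if_neg hq]
          have hstep : ftA_loop (s[i] :: s.drop (i + 1)) i 1 =
              ftA_loop (s.drop (i + 1)) (i + 1) 1 := by
            rw [not_or, not_or] at hq
            simp only [ftA_loop, hq.1, hq.2.1, hq.2.2, ite_false, ite_true]
            rw [if_neg hws]
          rw [hstep]
          exact ih (i + 1) (by omega) (by omega)
    · have hieq : i = s.length := by omega
      rw [ftB_loop]
      simp [hieq, List.drop_length, ftA_loop]

-- ===== VERDICT (by name: the statement is the Claim_ definition above) =====
theorem first_token_spec : Claim_equal_first_token := by
  intro string _
  unfold Spec_first_token first_token first_token_alt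
  rw [← String.toList_inj, PySem.Str.toList_slice]
  rw [ftB_eq_ftA _ ((PySem.Str.lstrip string).toList.length) 0 (by omega) (by omega)]
  rw [String.toList_ofList]
  simp [PySem.Chars.slice_eq_listSlice, PySem.List.slice_to_natCast]
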